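-- pv_equiv track=rewrite | github.com/facebookresearch/ParlAI | parlai/agents/legacy_agents/seq2seq/dict_v0.py | find_ngrams
-- ===== SOURCE A (Python) =====
-- def find_ngrams(token_dict, text, n):
--     """Break text into ngrams that appear in ``token_dict``.
--
--     :param token_dict: ``dict`` to check for ngrams
--     :param text: ``str`` to look for ngrams in
--     :param n: ``int`` max size of ngrams
--     """
--     # base case
--     if n <= 1:
--         return text
--     # tokens committed to output
--     saved_tokens = []
--     # tokens remaining to be searched in sentence
--     search_tokens = text[:]
--     # tokens stored until next ngram found
--     next_search = []
--     while len(search_tokens) >= n: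
--         ngram = ' '.join(search_tokens[:n])
--         if ngram in token_dict:
--             # first, search previous unmatched words for smaller ngrams
--             sub_n = min(len(next_search), n - 1)
--             saved_tokens.extend(find_ngrams(token_dict, next_search, sub_n))
--             next_search.clear()
--             # then add this ngram
--             saved_tokens.append(ngram)
--             # then pop this ngram from the remaining words to search
--             search_tokens = search_tokens[n:]
--         else:
--             next_search.append(search_tokens.pop(0))
--     remainder = next_search + search_tokens
--     sub_n = min(len(remainder), n - 1)
--     saved_tokens.extend(find_ngrams(token_dict, remainder, sub_n))
--     return saved_tokens
-- ===== SOURCE B (Python) =====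
-- def find_ngrams(token_dict, text, n):
--     """Break text into ngrams that appear in ``token_dict``.
--
--     Iterative layering instead of recursion: keep an ordered worklist of
--     items (matched ngram strings and unresolved runs of raw tokens) and
--     sweep it once per ngram size from large to small, then flatten.
--     """
--     if n <= 1:
--         return text
--     items = [list(text)]  # one unresolved run; lists are runs, strs are ngrams
--     for size in range(min(n, len(text)), 1, -1):
--         new_items = []
--         for item in items:
--             if isinstance(item, str):
--                 new_items.append(item)
--             else:
--                 new_items.extend(_split_run(token_dict, size, item))
--         items = new_items
--     out = []
--     for item in items:
--         if isinstance(item, str):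
--             out.append(item)
--         else:
--             out.extend(item)
--     return out
--
--
-- def _split_run(token_dict, size, run):
--     """Greedily cut one unresolved run at every dict ngram of this size."""
--     items = []
--     pending = []
--     rest = list(run)
--     while len(rest) >= size:
--         ngram = ' '.join(rest[:size])
--         if ngram in token_dict:
--             if pending:
--                 items.append(pending)
--                 pending = []
--             items.append(ngram)
--             rest = rest[size:]
--         else:
--             pending.append(rest.pop(0))
--     tail = pending + rest
--     if tail:
--         items.append(tail)
--     return items
-- ===== Notes on version B (the rewrite author's own statement) =====
-- stated objective: alternative
-- what changed: Replaces A's nested recursion (scan at size n, recursing with min(len, n-1) on each unmatched stretch) by a non-recursive two-phase pipeline: an ordered worklist of items (matched ngram strings vs unresolved token runs) swept once per size from min(n, len(text)) down to 2, then flattened.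
import Mathlib
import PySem

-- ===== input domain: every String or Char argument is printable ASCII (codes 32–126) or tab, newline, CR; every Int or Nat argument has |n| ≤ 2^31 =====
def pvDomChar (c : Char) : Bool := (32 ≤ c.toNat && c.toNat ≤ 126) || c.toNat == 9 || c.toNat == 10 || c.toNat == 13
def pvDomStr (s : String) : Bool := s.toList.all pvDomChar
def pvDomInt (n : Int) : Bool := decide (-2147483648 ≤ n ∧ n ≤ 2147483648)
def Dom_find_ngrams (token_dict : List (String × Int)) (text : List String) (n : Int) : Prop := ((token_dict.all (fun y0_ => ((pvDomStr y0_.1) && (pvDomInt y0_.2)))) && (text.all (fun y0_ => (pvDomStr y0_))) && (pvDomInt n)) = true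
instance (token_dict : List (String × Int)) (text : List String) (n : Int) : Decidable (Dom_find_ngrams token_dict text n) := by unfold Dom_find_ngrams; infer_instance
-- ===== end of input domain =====

-- B replaces A's nested recursion by a non-recursive worklist of items swept once per
-- ngram size from min(n, len(text)) down to 2, then flattened (objective: alternative).

-- ===== PORT A =====
-- `ngram in token_dict` (dict key membership)
def pvInDict (token_dict : List (String × Int)) (s : String) : Bool :=
  (PySem.Dict.mk token_dict).contains s

mutual
-- literal transliteration of A; the `while` loop is the helper fnScanA below
def find_ngrams (token_dict : List (String × Int)) (text : List String) (n : Int) : List String :=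
  if n ≤ 1 then text
  else fnScanA token_dict n text [] []
  termination_by (n.toNat, text.length, 1)
  decreasing_by exact Prod.Lex.right _ (Prod.Lex.right _ (by omega))

-- state of A's while loop: search_tokens, saved_tokens, next_search
def fnScanA (token_dict : List (String × Int)) (n : Int) (search saved next : List String) : List String :=
  if _h2 : n ≤ 1 then saved ++ next ++ search  -- unreachable totality guard: every call has 2 ≤ n
  else if _hlen : n ≤ (search.length : Int) then
    -- ngram = ' '.join(search_tokens[:n]); n ≥ 2 so take n.toNat is exact for the slice
    let ngram := PySem.Str.join " " (search.take n.toNat)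
    if pvInDict token_dict ngram then
      fnScanA token_dict n (search.drop n.toNat)
        (saved ++ find_ngrams token_dict next (min (next.length : Int) (n - 1)) ++ [ngram]) []
    else
      -- next_search.append(search_tokens.pop(0))
      fnScanA token_dict n (search.drop 1) saved (next ++ search.take 1)
  else
    saved ++ find_ngrams token_dict (next ++ search) (min ((next ++ search).length : Int) (n - 1))
  termination_by (n.toNat, search.length, 0)
  decreasing_by
    · exact Prod.Lex.left _ _ (by omega)
    · simp only [List.length_drop]
      exact Prod.Lex.right _ (Prod.Lex.left _ _ (by omega))
    · simp only [List.length_drop]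
      exact Prod.Lex.right _ (Prod.Lex.left _ _ (by omega))
    · exact Prod.Lex.left _ _ (by omega)
end

-- ===== PORT B =====
-- an item is a finished ngram (.inl) or an unresolved run of raw tokens (.inr)
-- _split_run: greedy scan of one run at one size (the while loop, state = pending, rest)
def splitRunB (token_dict : List (String × Int)) (size : Int) (pending rest : List String) :
    List (Sum String (List String)) :=
  if _h1 : size ≤ 1 then (if pending ++ rest = [] then [] else [Sum.inr (pending ++ rest)])
    -- unreachable totality guard: every call has 2 ≤ size
  else if _h : size ≤ (rest.length : Int) then
    let ngram := PySem.Str.join " " (rest.take size.toNat)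
    if pvInDict token_dict ngram then
      (if pending = [] then [] else [Sum.inr pending]) ++ [Sum.inl ngram] ++
        splitRunB token_dict size [] (rest.drop size.toNat)
    else splitRunB token_dict size (pending ++ rest.take 1) (rest.drop 1)
  else (if pending ++ rest = [] then [] else [Sum.inr (pending ++ rest)])
termination_by rest.length
decreasing_by
  · simp; omega
  · simp; omega

-- body of B's per-size sweep: strings pass through, runs are split
def procItemB (token_dict : List (String × Int)) (size : Int) (it : Sum String (List String)) :
    List (Sum String (List String)) :=
  match it with
  | Sum.inl s => [Sum.inl s]
  | Sum.inr run => splitRunB token_dict size [] run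

def find_ngrams_alt (token_dict : List (String × Int)) (text : List String) (n : Int) : List String :=
  if n ≤ 1 then text
  else
    let sizes := PySem.List.pyRange (min n (text.length : Int)) 1 (-1)
    let items := sizes.foldl (fun its size => its.flatMap (procItemB token_dict size)) [Sum.inr text]
    items.flatMap (fun it => match it with | Sum.inl s => [s] | Sum.inr run => run)

-- ===== PRECONDITION & SPEC =====
def Spec_find_ngrams (token_dict : List (String × Int)) (text : List String) (n : Int) (out : List String) : Prop := out = find_ngrams_alt token_dict text n
instance (token_dict : List (String × Int)) (text : List String) (n : Int) (out : List String) : Decidable (Spec_find_ngrams token_dict text n out) := by unfold Spec_find_ngrams; infer_instance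

-- ===== CLAIM (what is proved, stated in full; the proofs are below) =====
def Claim_equal_find_ngrams : Prop := ∀ (token_dict : List (String × Int)) (text : List String) (n : Int), Dom_find_ngrams token_dict text n → Spec_find_ngrams token_dict text n (find_ngrams token_dict text n)

-- ===== LEMMAS AND PROOFS =====

-- result of replaying A level by level: each run r still owes find_ngrams at size min(len r, m)
def recAcross (token_dict : List (String × Int)) (m : Int) (items : List (Sum String (List String))) : List String :=
  items.flatMap (fun it => match it with
    | Sum.inl s => [s]
    | Sum.inr r => find_ngrams token_dict r (min (r.length : Int) m))

def flattenI (items : List (Sum String (List String))) : List String :=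
  items.flatMap (fun it => match it with | Sum.inl s => [s] | Sum.inr run => run)

lemma find_ngrams_le_one (td : List (String × Int)) (text : List String) (m : Int)
    (hm : m ≤ 1) : find_ngrams td text m = text := by
  rw [find_ngrams.eq_def]
  simp [hm]

lemma find_ngrams_nil (td : List (String × Int)) (m : Int) : find_ngrams td [] m = [] := by
  by_cases hm : m ≤ 1
  · exact find_ngrams_le_one td [] m hm
  · rw [find_ngrams.eq_def]
    simp only [hm, if_false]
    rw [fnScanA.eq_def]
    simp only [hm, dite_false, List.nil_append, List.append_nil, List.length_nil,
      Int.natCast_zero]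
    rw [dif_neg (show ¬ m ≤ (0 : Int) by omega)]
    exact find_ngrams_le_one td [] (min 0 (m - 1)) (by omega)

lemma scan_eq (td : List (String × Int)) (n : Int) (hn : 2 ≤ n) :
    ∀ (k : Nat) (search pending saved : List String), search.length = k →
      fnScanA td n search saved pending = saved ++ recAcross td (n - 1) (splitRunB td n pending search) := by
  intro k
  induction k using Nat.strong_induction_on with
  | _ k IH =>
  intro search pending saved hk
  have hn1 : ¬ n ≤ 1 := by omega
  rw [fnScanA.eq_def, splitRunB.eq_def]
  rw [dif_neg hn1, dif_neg hn1]
  by_cases hlen : n ≤ (search.length : Int)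
  · rw [dif_pos hlen, dif_pos hlen]
    by_cases hmem : pvInDict td (PySem.Str.join " " (search.take n.toNat)) = true
    · simp only [hmem, if_true]
      rw [IH (search.drop n.toNat).length
        (by simp only [List.length_drop]; omega) _ _ _ rfl]
      by_cases hp : pending = []
      · subst hp
        simp [recAcross, find_ngrams_nil]
      · simp [recAcross, hp]
    · simp only [hmem, if_false, Bool.false_eq_true]
      rw [IH (search.drop 1).length
        (by simp only [List.length_drop]; omega) _ _ _ rfl]
  · rw [dif_neg hlen, dif_neg hlen]
    by_cases hp : pending ++ search = []
    · simp [recAcross, hp, find_ngrams_nil]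
    · simp [recAcross, hp]

lemma run_step (td : List (String × Int)) (m : Int) (hm : 2 ≤ m) (r : List String) :
    find_ngrams td r (min (r.length : Int) m) = recAcross td (m - 1) (splitRunB td m [] r) := by
  by_cases hlen : m ≤ (r.length : Int)
  · have hmin : min (r.length : Int) m = m := by omega
    rw [hmin, find_ngrams.eq_def, if_neg (by omega : ¬ m ≤ 1)]
    simpa using scan_eq td m hm r.length r [] [] rfl
  · rw [splitRunB.eq_def, dif_neg (by omega : ¬ m ≤ 1), dif_neg hlen]
    by_cases hr : r = []
    · subst hr
      simp [recAcross, find_ngrams_nil]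
    · simp only [List.nil_append, hr, if_false]
      simp only [recAcross, List.flatMap_cons, List.flatMap_nil, List.append_nil]
      have h1 : min (r.length : Int) m = (r.length : Int) := by omega
      have h2 : min (r.length : Int) (m - 1) = (r.length : Int) := by omega
      rw [h1, h2]

lemma step_eq (td : List (String × Int)) (m : Int) (hm : 2 ≤ m)
    (items : List (Sum String (List String))) :
    recAcross td m items = recAcross td (m - 1) (items.flatMap (procItemB td m)) := by
  induction items with
  | nil => simp [recAcross]
  | cons it rest ih =>
    cases it with
    | inl s =>
      simp only [recAcross, List.flatMap_cons, List.flatMap_append, List.flatMap_nil,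
        List.append_nil, procItemB] at ih ⊢
      rw [ih]
    | inr r =>
      simp only [recAcross, List.flatMap_cons, List.flatMap_append, procItemB] at ih ⊢
      rw [ih]
      congr 1
      have hrun := run_step td m hm r
      simp only [recAcross] at hrun
      exact hrun

lemma recAcross_le_one (td : List (String × Int)) (m : Int) (hm : m ≤ 1)
    (items : List (Sum String (List String))) : recAcross td m items = flattenI items := by
  induction items with
  | nil => rfl
  | cons it rest ih =>
    cases it with
    | inl s => simp only [recAcross, flattenI, List.flatMap_cons] at ih ⊢; rw [ih]
    | inr r =>
      simp only [recAcross, flattenI, List.flatMap_cons] at ih ⊢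
      rw [ih, find_ngrams_le_one td r _ (by omega)]

lemma layers_eq (td : List (String × Int)) :
    ∀ (k : Nat) (m : Int), m.toNat = k →
      ∀ items, recAcross td m items =
        flattenI ((PySem.List.pyRange m 1 (-1)).foldl
          (fun its size => its.flatMap (procItemB td size)) items) := by
  intro k
  induction k using Nat.strong_induction_on with
  | _ k IH =>
  intro m hm items
  by_cases h1 : m ≤ 1
  · rw [PySem.List.pyRange_neg_one_eq_nil h1]
    exact recAcross_le_one td m h1 items
  · rw [PySem.List.pyRange_neg_one_cons (by omega : (1 : Int) < m)]
    simp only [List.foldl_cons]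
    rw [step_eq td m (by omega) items]
    exact IH (m - 1).toNat (by omega) (m - 1) (by omega) _

lemma find_ngrams_big (td : List (String × Int)) (text : List String) (n : Int)
    (hn : 2 ≤ n) (h : (text.length : Int) < n) :
    find_ngrams td text n = find_ngrams td text (text.length : Int) := by
  rw [find_ngrams.eq_def, if_neg (by omega : ¬ n ≤ 1), fnScanA.eq_def,
    dif_neg (by omega : ¬ n ≤ 1), dif_neg (by omega : ¬ n ≤ (text.length : Int))]
  simp only [List.nil_append]
  congr 1
  omega

-- ===== VERDICT (by name: the statement is the Claim_ definition above) =====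
theorem find_ngrams_spec : Claim_equal_find_ngrams := by
  intro td text n _hdom
  show find_ngrams td text n = find_ngrams_alt td text n
  unfold find_ngrams_alt
  by_cases hn : n ≤ 1
  · rw [if_pos hn, find_ngrams_le_one td text n hn]
  · rw [if_neg hn]
    have hl := layers_eq td (min n (text.length : Int)).toNat (min n (text.length : Int)) rfl
      [Sum.inr text]
    simp only [flattenI] at hl
    rw [← hl]
    simp only [recAcross, List.flatMap_cons, List.flatMap_nil, List.append_nil]
    by_cases hbig : n ≤ (text.length : Int)
    · have h : min ((text.length : Int)) (min n (text.length : Int)) = n := by omega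
      rw [h]
    · rw [find_ngrams_big td text n (by omega) (by omega)]
      congr 1
      omega
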